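-- pv_equiv track=rewrite | github.com/Liamhasson/Job_Agent | modules/pdf/generator.py | _cover_letter_to_html
-- ===== SOURCE A (Python) =====
-- def _cover_letter_to_html(text: str) -> str:
--     """
--     Converts cover letter plain text to styled HTML.
--     Detects the addressee line (Company — Role) and styles it separately.
--     """
--     lines = text.strip().split("\n")
--
--     # Collect paragraphs
--     paragraphs: list[str] = []
--     current: list[str] = []
--     for line in lines:
--         if line.strip() == "":
--             if current:
--                 paragraphs.append(" ".join(current))
--                 current = []
--         else:
--             current.append(line.strip())
--     if current:
--         paragraphs.append(" ".join(current))
--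
--     # Strip off any "Liam Hasson / Berlin..." header lines Claude might include
--     # (we render our own header)
--     while paragraphs and (
--         paragraphs[0].startswith("Liam Hasson") or
--         paragraphs[0].startswith("Berlin") or
--         paragraphs[0].startswith("+49")
--     ):
--         paragraphs.pop(0)
--
--     parts = [
--         '<div class="cl-header">',
--         '<div class="cl-name">Liam Hasson</div>',
--         '<div class="cl-contact">Berlin, Germany · Liamhasson@gmail.com · liamhasson.figma.site</div>',
--         '</div>',
--     ]
--
--     for para in paragraphs:
--         if para.startswith("Best,") or para.startswith("Best Liam") or para == "Liam Hasson":
--             parts.append(f'<p class="signature">{para}</p>')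
--         else:
--             parts.append(f"<p>{para}</p>")
--
--     return "\n".join(parts)
-- ===== SOURCE B (Python) =====
-- def _paragraphs(lines):
--     """Split-first: group maximal runs of non-empty (already stripped) lines."""
--     paras = []
--     i, n = 0, len(lines)
--     while i < n:
--         if lines[i] == "":
--             i += 1
--             continue
--         j = i
--         while j < n and lines[j] != "":
--             j += 1
--         paras.append(" ".join(lines[i:j]))
--         i = j
--     return paras
--
--
-- def _cover_letter_to_html(text: str) -> str:
--     lines = [ln.strip() for ln in text.strip().split("\n")]
--     paras = _paragraphs(lines)
--
--     # Drop any leading header paragraphs (we render our own header)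
--     n = 0
--     while n < len(paras) and paras[n].startswith(("Liam Hasson", "Berlin", "+49")):
--         n += 1
--     paras = paras[n:]
--
--     head = [
--         '<div class="cl-header">',
--         '<div class="cl-name">Liam Hasson</div>',
--         '<div class="cl-contact">Berlin, Germany · Liamhasson@gmail.com · liamhasson.figma.site</div>',
--         '</div>',
--     ]
--     body = [
--         '<p class="signature">%s</p>' % p
--         if p.startswith(("Best,", "Best Liam")) or p == "Liam Hasson"
--         else '<p>%s</p>' % p
--         for p in paras
--     ]
--     return "\n".join(head + body)
-- ===== Notes on version B (the rewrite author's own statement) =====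
-- stated objective: alternative
-- what changed: Paragraphs are built by a split-first pass that scans maximal runs of non-empty stripped lines and joins each run, replacing A's accumulate-and-flush loop; the header strip becomes an index advance over the leading header paragraphs and the HTML body is a comprehension instead of an append loop.
import Mathlib
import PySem

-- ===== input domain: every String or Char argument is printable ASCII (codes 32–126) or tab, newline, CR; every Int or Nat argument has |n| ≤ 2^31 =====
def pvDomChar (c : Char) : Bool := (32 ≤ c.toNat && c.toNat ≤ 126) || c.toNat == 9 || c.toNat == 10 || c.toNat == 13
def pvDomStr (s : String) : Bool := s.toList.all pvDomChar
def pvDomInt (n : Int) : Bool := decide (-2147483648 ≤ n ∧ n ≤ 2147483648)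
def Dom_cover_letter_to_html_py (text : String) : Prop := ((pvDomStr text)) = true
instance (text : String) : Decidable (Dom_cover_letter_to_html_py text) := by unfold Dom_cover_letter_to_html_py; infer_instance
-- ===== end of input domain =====

-- B differs from A only in how the paragraph list is built (split-first run scan vs
-- accumulate-and-flush) and in emitting the body by map instead of an append loop.

-- ===== PORT A =====
-- one iteration of A's paragraph-collecting for-loop; state = (paragraphs, current)
def clAStep (st : List String × List String) (line : String) : List String × List String :=
  if PySem.Str.strip line = "" then
    (if st.2 = [] then st else (st.1 ++ [PySem.Str.join " " st.2], []))
  else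
    (st.1, st.2 ++ [PySem.Str.strip line])

-- A's "while paragraphs and paragraphs[0].startswith(...): paragraphs.pop(0)"
def clAHeaderLoop : List String → List String
  | [] => []
  | p :: rest =>
      if PySem.Str.startswith p "Liam Hasson" || PySem.Str.startswith p "Berlin" ||
         PySem.Str.startswith p "+49" then
        clAHeaderLoop rest
      else
        p :: rest

def clAEmit (para : String) : String :=
  if PySem.Str.startswith para "Best," || PySem.Str.startswith para "Best Liam" ||
     para = "Liam Hasson" then
    "<p class=\"signature\">" ++ para ++ "</p>"
  else
    "<p>" ++ para ++ "</p>"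

def cover_letter_to_html_py (text : String) : String :=
  -- split("\n"): sep ≠ "", so split? is always `some`; getD [] only discharges the option
  let lines := (PySem.Str.split? (PySem.Str.strip text) "\n").getD []
  let st := lines.foldl clAStep ([], [])
  let paragraphs := if st.2 = [] then st.1 else st.1 ++ [PySem.Str.join " " st.2]
  let paragraphs := clAHeaderLoop paragraphs
  let parts : List String :=
    ["<div class=\"cl-header\">",
     "<div class=\"cl-name\">Liam Hasson</div>",
     "<div class=\"cl-contact\">Berlin, Germany · Liamhasson@gmail.com · liamhasson.figma.site</div>",
     "</div>"]
  let parts := paragraphs.foldl (fun acc p => acc ++ [clAEmit p]) parts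
  PySem.Str.join "\n" parts

-- ===== PORT B =====
-- Source B's _paragraphs: outer while = recursion, inner run scan = takeWhile/dropWhile
def clBRuns : List String → List String
  | [] => []
  | l :: rest =>
      if l = "" then clBRuns rest
      else
        PySem.Str.join " " (l :: rest.takeWhile (· ≠ "")) ::
          clBRuns (rest.dropWhile (· ≠ ""))
termination_by ls => ls.length
decreasing_by
  · simp
  · have := List.length_dropWhile_le (p := fun x => decide (x ≠ "")) (l := rest)
    simp only [List.length_cons]
    omega

def clBIsHeader (p : String) : Bool :=
  PySem.Str.startswith p "Liam Hasson" || PySem.Str.startswith p "Berlin" ||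
    PySem.Str.startswith p "+49"

def clBEmit (p : String) : String :=
  if PySem.Str.startswith p "Best," || PySem.Str.startswith p "Best Liam" ||
     p = "Liam Hasson" then
    "<p class=\"signature\">" ++ p ++ "</p>"
  else
    "<p>" ++ p ++ "</p>"

def cover_letter_to_html_py_alt (text : String) : String :=
  -- split("\n"): sep ≠ "", so split? is always `some`; getD [] only discharges the option
  let lines := ((PySem.Str.split? (PySem.Str.strip text) "\n").getD []).map PySem.Str.strip
  -- the counting while-loop followed by paras[n:] is exactly dropWhile on the header prefix
  let paras := (clBRuns lines).dropWhile clBIsHeader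
  let head : List String :=
    ["<div class=\"cl-header\">",
     "<div class=\"cl-name\">Liam Hasson</div>",
     "<div class=\"cl-contact\">Berlin, Germany · Liamhasson@gmail.com · liamhasson.figma.site</div>",
     "</div>"]
  PySem.Str.join "\n" (head ++ paras.map clBEmit)

-- ===== PRECONDITION & SPEC =====
def Spec_cover_letter_to_html_py (text : String) (out : String) : Prop := out = cover_letter_to_html_py_alt text
instance (text : String) (out : String) : Decidable (Spec_cover_letter_to_html_py text out) := by unfold Spec_cover_letter_to_html_py; infer_instance

-- ===== CLAIM (what is proved, stated in full; the proofs are below) =====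
def Claim_equal_cover_letter_to_html_py : Prop := ∀ (text : String), Dom_cover_letter_to_html_py text → Spec_cover_letter_to_html_py text (cover_letter_to_html_py text)

-- ===== LEMMAS AND PROOFS =====

-- reference paragraph builder: pending run `cur`, remaining stripped lines
def clP (cur : List String) : List String → List String
  | [] => if cur = [] then [] else [PySem.Str.join " " cur]
  | l :: rest =>
      if l = "" then
        (if cur = [] then clP [] rest else PySem.Str.join " " cur :: clP [] rest)
      else
        clP (cur ++ [l]) rest

theorem clA_fold_eq_clP (lines : List String) (ps cur : List String) :
    (let st := lines.foldl clAStep (ps, cur);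
     if st.2 = [] then st.1 else st.1 ++ [PySem.Str.join " " st.2]) =
      ps ++ clP cur (lines.map PySem.Str.strip) := by
  induction lines generalizing ps cur with
  | nil =>
      simp only [List.foldl_nil, List.map_nil, clP]
      split <;> simp_all
  | cons l ls ih =>
      simp only [List.foldl_cons, List.map_cons, clP, clAStep]
      by_cases h : PySem.Str.strip l = ""
      · by_cases hc : cur = []
        · simp [h, hc, ih]
        · simp [h, hc, ih, List.append_assoc]
      · simp [h, ih]

theorem clP_run (ls : List String) (cur : List String) (h : cur ≠ []) :
    clP cur ls =
      PySem.Str.join " " (cur ++ ls.takeWhile (· ≠ "")) ::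
        clP [] (ls.dropWhile (· ≠ "")) := by
  induction ls generalizing cur with
  | nil => simp [clP, h]
  | cons l rest ih =>
      by_cases hl : l = ""
      · simp [clP, hl, h]
      · simp only [clP, hl, List.takeWhile_cons, List.dropWhile_cons]
        rw [ih (cur ++ [l]) (by simp)]
        simp [hl, List.append_assoc]

theorem clBRuns_eq_clP (ls : List String) : clBRuns ls = clP [] ls := by
  induction ls using clBRuns.induct with
  | case1 => simp [clBRuns, clP]
  | case2 rest ih =>
      simp [clBRuns, clP, ih]
  | case3 l rest h ih =>
      rw [clBRuns, if_neg h, ih, show clP [] (l :: rest) = clP [l] rest by simp [clP, h],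
        clP_run rest [l] (by simp)]
      simp

theorem clAHeaderLoop_eq_dropWhile (ps : List String) :
    clAHeaderLoop ps = ps.dropWhile clBIsHeader := by
  induction ps with
  | nil => rfl
  | cons p rest ih =>
      simp only [clAHeaderLoop, List.dropWhile_cons, clBIsHeader]
      split_ifs with h <;> simp_all

theorem clA_emit_fold (f : String → String) (ps : List String) (init : List String) :
    ps.foldl (fun acc p => acc ++ [f p]) init = init ++ ps.map f := by
  induction ps generalizing init with
  | nil => simp
  | cons p rest ih => simp [ih, List.append_assoc]

theorem clAEmit_eq_clBEmit : clAEmit = clBEmit := rfl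

-- ===== VERDICT (by name: the statement is the Claim_ definition above) =====
theorem cover_letter_to_html_py_spec : Claim_equal_cover_letter_to_html_py := by
  intro text _
  unfold Spec_cover_letter_to_html_py cover_letter_to_html_py cover_letter_to_html_py_alt
  simp only [clA_fold_eq_clP, List.nil_append, clAHeaderLoop_eq_dropWhile, clA_emit_fold,
    clBRuns_eq_clP, clAEmit_eq_clBEmit]
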